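-- pv_equiv track=rewrite | github.com/Mark-ZhouWX/mindone | examples/opensora_pku/opensora/dataset/t2v_datasets.py | find_closest_y
-- ===== SOURCE A (Python) =====
-- def find_closest_y(x, vae_stride_t=4, model_ds_t=1):
--     min_num_frames = 29
--     if x < min_num_frames:
--         return -1
--     for y in range(x, min_num_frames - 1, -1):
--         if (y - 1) % vae_stride_t == 0 and ((y - 1) // vae_stride_t + 1) % model_ds_t == 0:
--             return y
--     return -1
-- ===== SOURCE B (Python) =====
-- def find_closest_y(x, vae_stride_t=4, model_ds_t=1):
--     if x < 29:
--         return -1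
--     M = abs(vae_stride_t * model_ds_t)
--     y = x - (x - 1 + vae_stride_t) % M
--     return y if y >= 29 else -1
-- ===== Notes on version B (the rewrite author's own statement) =====
-- stated objective: faster
-- what changed: Replaced the downward linear scan over range(x,28,-1) by an O(1) closed form: the two divisibility tests are equivalent to (y-1+vae_stride_t) % abs(vae_stride_t*model_ds_t) == 0, so the largest valid y <= x is computed by one modulo and compared against the floor 29.
-- outside the precondition, e.g. on find_closest_y(29, 5, 0): A returns -1, B raises ZeroDivisionError
import Mathlib
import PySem

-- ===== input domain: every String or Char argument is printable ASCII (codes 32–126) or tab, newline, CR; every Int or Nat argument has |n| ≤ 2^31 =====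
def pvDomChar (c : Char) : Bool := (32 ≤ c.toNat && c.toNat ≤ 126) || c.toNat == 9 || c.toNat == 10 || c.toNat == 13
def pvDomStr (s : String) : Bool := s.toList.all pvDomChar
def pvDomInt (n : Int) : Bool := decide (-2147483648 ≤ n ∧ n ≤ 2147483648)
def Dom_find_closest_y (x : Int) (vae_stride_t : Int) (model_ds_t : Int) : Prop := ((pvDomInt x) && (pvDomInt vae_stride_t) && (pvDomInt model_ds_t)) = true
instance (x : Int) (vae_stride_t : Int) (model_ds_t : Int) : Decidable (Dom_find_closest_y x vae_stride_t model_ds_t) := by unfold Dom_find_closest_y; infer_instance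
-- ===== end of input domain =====

-- B replaces A's downward linear scan by one O(1) modular-arithmetic formula (asymptotically faster).

-- ===== PORT A =====
-- the for-loop over range(x, 28, -1), counting down with fuel = number of iterations left
def pvLoopA (vae_stride_t model_ds_t : Int) (y : Int) : Nat → Int
  | 0 => -1
  | Nat.succ fuel =>
      if PySem.Int.mod (y - 1) vae_stride_t = 0 ∧
         PySem.Int.mod (PySem.Int.floordiv (y - 1) vae_stride_t + 1) model_ds_t = 0 then y
      else pvLoopA vae_stride_t model_ds_t (y - 1) fuel

def find_closest_y (x : Int) (vae_stride_t : Int) (model_ds_t : Int) : Int :=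
  if x < 29 then -1
  else pvLoopA vae_stride_t model_ds_t x (x - 28).toNat

-- ===== PORT B =====
def find_closest_y_alt (x : Int) (vae_stride_t : Int) (model_ds_t : Int) : Int :=
  if x < 29 then -1
  else
    let M : Int := ((vae_stride_t * model_ds_t).natAbs : Int)
    let y := x - PySem.Int.mod (x - 1 + vae_stride_t) M
    if y ≥ 29 then y else -1

-- ===== PRECONDITION & SPEC =====
-- Pre_ excludes vae_stride_t = 0 or model_ds_t = 0 when x ≥ 29: there A raises ZeroDivisionError,
-- except that with model_ds_t = 0 and no stride candidate in [29, x] A returns -1 while B divides by zero.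
def Pre_find_closest_y (x : Int) (vae_stride_t : Int) (model_ds_t : Int) : Prop :=
  x < 29 ∨ (vae_stride_t ≠ 0 ∧ model_ds_t ≠ 0)
instance (x : Int) (vae_stride_t : Int) (model_ds_t : Int) : Decidable (Pre_find_closest_y x vae_stride_t model_ds_t) := by unfold Pre_find_closest_y; infer_instance
def pvWitness_find_closest_y : Int × Int × Int := (33, 4, 1)
def Spec_find_closest_y (x : Int) (vae_stride_t : Int) (model_ds_t : Int) (out : Int) : Prop := out = find_closest_y_alt x vae_stride_t model_ds_t
instance (x : Int) (vae_stride_t : Int) (model_ds_t : Int) (out : Int) : Decidable (Spec_find_closest_y x vae_stride_t model_ds_t out) := by unfold Spec_find_closest_y; infer_instance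

-- ===== CLAIM (what is proved, stated in full; the proofs are below) =====
def Claim_equal_find_closest_y : Prop := ∀ (x : Int) (vae_stride_t : Int) (model_ds_t : Int), Dom_find_closest_y x vae_stride_t model_ds_t → Pre_find_closest_y x vae_stride_t model_ds_t → Spec_find_closest_y x vae_stride_t model_ds_t (find_closest_y x vae_stride_t model_ds_t)

-- ===== LEMMAS AND PROOFS =====

-- B's closed form, without the x < 29 guard (proof-side helper)
def pvCf (v m y : Int) : Int :=
  if y - (y - 1 + v) % ((v * m).natAbs : Int) ≥ 29
  then y - (y - 1 + v) % ((v * m).natAbs : Int) else -1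

lemma pvM_pos (v m : Int) (hv : v ≠ 0) (hm : m ≠ 0) : (0:Int) < ((v * m).natAbs : Int) := by
  have : v * m ≠ 0 := mul_ne_zero hv hm
  have : (v * m).natAbs ≠ 0 := Int.natAbs_ne_zero.mpr this
  omega

-- the core equivalence: A's two-part divisibility test = one congruence mod |v*m|
lemma pvCond_iff (v m z : Int) (hv : v ≠ 0) (_hm : m ≠ 0) :
    (PySem.Int.mod z v = 0 ∧ PySem.Int.mod (PySem.Int.floordiv z v + 1) m = 0)
    ↔ (z + v) % ((v * m).natAbs : Int) = 0 := by
  rw [PySem.Int.mod_eq_zero_iff_dvd, PySem.Int.mod_eq_zero_iff_dvd,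
      ← Int.dvd_iff_emod_eq_zero, Int.natAbs_dvd]
  constructor
  · rintro ⟨⟨t, ht⟩, hdm⟩
    have hq : PySem.Int.floordiv z v = t := by
      have h := PySem.Int.floordiv_mul_add_mod z v
      rw [(PySem.Int.mod_eq_zero_iff_dvd z v).mpr ⟨t, ht⟩] at h
      have : PySem.Int.floordiv z v * v = t * v := by rw [mul_comm t v, ← ht]; omega
      exact mul_right_cancel₀ hv this
    rw [hq] at hdm
    obtain ⟨s, hs⟩ := hdm
    exact ⟨s, by rw [ht]; linear_combination v * hs⟩
  · intro hdvm
    have hvz : v ∣ z := by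
      have : v ∣ z + v := dvd_trans (Dvd.intro m rfl) hdvm
      exact (dvd_add_right (dvd_refl v)).mp (by rwa [add_comm] at this)
    obtain ⟨t, ht⟩ := hvz
    have hq : PySem.Int.floordiv z v = t := by
      have h := PySem.Int.floordiv_mul_add_mod z v
      rw [(PySem.Int.mod_eq_zero_iff_dvd z v).mpr ⟨t, ht⟩] at h
      have : PySem.Int.floordiv z v * v = t * v := by rw [mul_comm t v, ← ht]; omega
      exact mul_right_cancel₀ hv this
    refine ⟨⟨t, ht⟩, ?_⟩
    have : v * m ∣ v * (t + 1) := by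
      have : z + v = v * (t + 1) := by rw [ht]; ring
      rwa [this] at hdvm
    rw [hq]
    exact (mul_dvd_mul_iff_left hv).mp this

lemma pvEmod_pred (M a : Int) (hM : 0 < M) (h : a % M ≠ 0) : (a - 1) % M = a % M - 1 := by
  have h0 : 0 ≤ a % M := Int.emod_nonneg a (by omega)
  have h1 : a % M < M := Int.emod_lt_of_pos a hM
  have hM2 : 1 < M := by omega
  rw [Int.sub_emod, Int.emod_eq_of_lt (by omega) hM2, Int.emod_eq_of_lt (by omega) (by omega)]

lemma pvLoop_eq (v m : Int) (hv : v ≠ 0) (hm : m ≠ 0) :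
    ∀ (n : Nat) (y : Int), y = 28 + n → pvLoopA v m y n = pvCf v m y := by
  intro n
  induction n with
  | zero =>
    intro y hy
    have hM := pvM_pos v m hv hm
    have := Int.emod_nonneg (y - 1 + v) (by omega : ((v * m).natAbs : Int) ≠ 0)
    simp only [pvLoopA, pvCf]
    rw [if_neg (by omega)]
  | succ n ih =>
    intro y hy
    have hM := pvM_pos v m hv hm
    simp only [pvLoopA]
    by_cases hc : PySem.Int.mod (y - 1) v = 0 ∧
        PySem.Int.mod (PySem.Int.floordiv (y - 1) v + 1) m = 0
    · rw [if_pos hc]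
      have h0 : (y - 1 + v) % ((v * m).natAbs : Int) = 0 := (pvCond_iff v m (y - 1) hv hm).mp hc
      simp only [pvCf, h0]
      rw [if_pos (by push_cast at hy ⊢; omega)]
      omega
    · rw [if_neg hc]
      rw [ih (y - 1) (by push_cast at hy ⊢; omega)]
      have h0 : (y - 1 + v) % ((v * m).natAbs : Int) ≠ 0 := fun h =>
        hc ((pvCond_iff v m (y - 1) hv hm).mpr h)
      have hpred : (y - 1 - 1 + v) % ((v * m).natAbs : Int)
          = (y - 1 + v) % ((v * m).natAbs : Int) - 1 := by
        have := pvEmod_pred ((v * m).natAbs : Int) (y - 1 + v) hM h0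
        have he : y - 1 - 1 + v = (y - 1 + v) - 1 := by ring
        rw [he, this]
      simp only [pvCf, hpred]
      have : y - 1 - ((y - 1 + v) % ((v * m).natAbs : Int) - 1)
          = y - (y - 1 + v) % ((v * m).natAbs : Int) := by ring
      rw [this]

-- ===== VERDICT (by name: the statement is the Claim_ definition above) =====
theorem find_closest_y_spec : Claim_equal_find_closest_y := by
  intro x v m _ hpre
  unfold Spec_find_closest_y find_closest_y find_closest_y_alt
  by_cases hx : x < 29
  · rw [if_pos hx, if_pos hx]
  · rw [if_neg hx, if_neg hx]
    obtain ⟨hv, hm⟩ : v ≠ 0 ∧ m ≠ 0 := by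
      rcases hpre with h | h
      · exact absurd h hx
      · exact h
    have hM := pvM_pos v m hv hm
    rw [pvLoop_eq v m hv hm (x - 28).toNat x (by omega)]
    simp only [pvCf]
    rw [PySem.Int.mod_eq_emod_of_pos hM]
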